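-- pv_equiv track=rewrite | github.com/zyy-cn/wsovvis | tests/stageb/lvvis_val_full_audit.py | _parse_clip_ids
-- ===== SOURCE A (Python) =====
-- from typing import Any, Dict, Iterable, List, Optional, Sequence, Tuple
--
-- def _parse_clip_ids(arg: str) -> List[str]:
--     values = [x.strip() for x in str(arg).split(",") if x.strip()]
--     normalized: List[str] = []
--     for item in values:
--         if item.lstrip("-").isdigit():
--             normalized.append(str(int(item)))
--         else:
--             normalized.append(item)
--     return sorted(set(normalized), key=lambda x: (not x.lstrip("-").isdigit(), x))
-- ===== SOURCE B (Python) =====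
-- def _parse_clip_ids(arg):
--     numerics = []
--     others = []
--     for chunk in str(arg).split(","):
--         item = chunk.strip()
--         if not item:
--             continue
--         if item.lstrip("-").isdigit():
--             numerics.append(str(int(item)))
--         else:
--             others.append(item)
--     return sorted(set(numerics)) + sorted(set(others))
-- ===== Notes on version B (the rewrite author's own statement) =====
-- stated objective: alternative
-- what changed: Single pass that strips, drops empties, normalizes and partitions tokens into numeric/other buckets, then concatenates two plain sorts of the deduped buckets, instead of building one normalized list and doing a single composite-key (not-is-digit, value) sort.
import Mathlib
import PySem

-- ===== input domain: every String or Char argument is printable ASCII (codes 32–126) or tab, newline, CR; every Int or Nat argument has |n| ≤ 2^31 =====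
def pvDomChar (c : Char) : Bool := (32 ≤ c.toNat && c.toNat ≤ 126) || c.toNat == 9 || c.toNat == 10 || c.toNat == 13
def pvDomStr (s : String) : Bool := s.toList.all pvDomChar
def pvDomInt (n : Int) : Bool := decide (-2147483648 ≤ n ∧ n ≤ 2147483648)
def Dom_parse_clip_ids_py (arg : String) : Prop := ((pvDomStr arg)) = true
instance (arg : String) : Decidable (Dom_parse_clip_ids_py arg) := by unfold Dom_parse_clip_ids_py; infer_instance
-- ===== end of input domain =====

-- B replaces A's single composite-key (not-is-digit, value) sort by a one-pass partition into
-- numeric/other buckets followed by two plain sorts of the deduped buckets (alternative decomposition, same cost).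

-- item.lstrip("-").isdigit()  (shared predicate of both Pythons; lstrip("-") ported by hand as
-- dropWhile (· == '-') — exact: Python lstrip with chars drops exactly the leading run of those chars)
def pvNumLike (s : String) : Bool := PySem.Chars.strIsdigit (s.toList.dropWhile (· == '-'))

-- ===== PORT A =====
def parse_clip_ids_py (arg : String) : List String :=
  let values := ((PySem.Str.split? arg ",").getD []).filterMap
    (fun x => if PySem.Str.strip x = "" then none else some (PySem.Str.strip x))
  let normalized := values.foldl
    (fun acc item =>
      if pvNumLike item then acc ++ [PySem.Int.toStr ((PySem.Int.ofStr? item).getD 0)]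
      else acc ++ [item]) []
  PySem.List.sorted2 (PySem.Set.ofList normalized) (fun x => !pvNumLike x) (fun x => x)

-- ===== PORT B =====
def parse_clip_ids_py_alt (arg : String) : List String :=
  let buckets := ((PySem.Str.split? arg ",").getD []).foldl
    (fun (acc : List String × List String) chunk =>
      if PySem.Str.strip chunk = "" then acc
      else if pvNumLike (PySem.Str.strip chunk) then
        (acc.1 ++ [PySem.Int.toStr ((PySem.Int.ofStr? (PySem.Str.strip chunk)).getD 0)], acc.2)
      else (acc.1, acc.2 ++ [PySem.Str.strip chunk])) ([], [])
  PySem.List.sorted (PySem.Set.ofList buckets.1) (fun x => x)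
    ++ PySem.List.sorted (PySem.Set.ofList buckets.2) (fun x => x)

-- ===== PRECONDITION & SPEC =====
-- Pre_ excludes exactly the inputs where some stripped token is a run of at least two dashes
-- followed by digits: there both A and B raise ValueError identically in int(item) (the token
-- passes the lstrip/isdigit test but is no int literal).
def Pre_parse_clip_ids_py (arg : String) : Prop :=
  ∀ x ∈ (PySem.Str.split? arg ",").getD [],
    pvNumLike (PySem.Str.strip x) = true →
      (((PySem.Str.strip x).toList.takeWhile (· == '-')).length ≤ 1)
instance (arg : String) : Decidable (Pre_parse_clip_ids_py arg) := by
  unfold Pre_parse_clip_ids_py; infer_instance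
def pvWitness_parse_clip_ids_py : String := " 3, 1 ,007,a,3,-0, -5,foo bar ,, x"
def Spec_parse_clip_ids_py (arg : String) (out : List String) : Prop := out = parse_clip_ids_py_alt arg
instance (arg : String) (out : List String) : Decidable (Spec_parse_clip_ids_py arg out) := by unfold Spec_parse_clip_ids_py; infer_instance

-- ===== CLAIM (what is proved, stated in full; the proofs are below) =====
def Claim_equal_parse_clip_ids_py : Prop := ∀ (arg : String), Dom_parse_clip_ids_py arg → Pre_parse_clip_ids_py arg → Spec_parse_clip_ids_py arg (parse_clip_ids_py arg)

-- ===== LEMMAS AND PROOFS =====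

-- the common per-token normalization
def pvNorm (item : String) : String :=
  if pvNumLike item then PySem.Int.toStr ((PySem.Int.ofStr? item).getD 0) else item

-- every character Nat.toDigits 10 produces is a decimal digit, and the output is nonempty
theorem pv_toDigitsCore_digits (f : Nat) : ∀ (n : Nat) (l : List Char),
    (∀ c ∈ l, PySem.Chars.isdigit c = true) →
    ∀ c ∈ Nat.toDigitsCore 10 f n l, PySem.Chars.isdigit c = true := by
  induction f with
  | zero => intro n l hl c hc; exact hl c hc
  | succ f ih =>
    intro n l hl c hc
    have hdig : ∀ m : Nat, m < 10 → PySem.Chars.isdigit (Nat.digitChar m) = true := by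
      decide
    rw [Nat.toDigitsCore] at hc
    by_cases h : n / 10 = 0
    · simp only [h, if_true] at hc
      rcases List.mem_cons.mp hc with h1 | h1
      · subst h1; exact hdig _ (Nat.mod_lt _ (by norm_num))
      · exact hl c h1
    · simp only [h, if_false] at hc
      refine ih _ _ ?_ c hc
      intro d hd
      rcases List.mem_cons.mp hd with h1 | h1
      · subst h1; exact hdig _ (Nat.mod_lt _ (by norm_num))
      · exact hl d h1

theorem pv_toDigitsCore_ne_nil (f : Nat) : ∀ (n : Nat) (l : List Char),
    0 < f → Nat.toDigitsCore 10 f n l ≠ [] := by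
  induction f with
  | zero => intro n l h; omega
  | succ f ih =>
    intro n l _
    rw [Nat.toDigitsCore]
    by_cases h : n / 10 = 0
    · simp [h]
    · simp only [h, if_false]
      by_cases hf : 0 < f
      · exact ih _ _ hf
      · have hf0 : f = 0 := by omega
        subst hf0
        rw [Nat.toDigitsCore]
        simp

theorem pv_strIsdigit_toDigits (n : Nat) :
    PySem.Chars.strIsdigit (Nat.toDigits 10 n) = true := by
  unfold PySem.Chars.strIsdigit Nat.toDigits
  have h1 := pv_toDigitsCore_ne_nil (n + 1) n [] (by omega)
  have h2 := pv_toDigitsCore_digits (n + 1) n [] (by simp)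
  rw [Bool.and_eq_true, List.all_eq_true]
  refine ⟨?_, h2⟩
  simpa [List.isEmpty_iff] using h1

theorem pv_dropWhile_dash_digits (l : List Char) (h : PySem.Chars.strIsdigit l = true) :
    l.dropWhile (· == '-') = l := by
  rcases l with _ | ⟨c, t⟩
  · rfl
  · have hc : PySem.Chars.isdigit c = true := by
      unfold PySem.Chars.strIsdigit at h
      rw [Bool.and_eq_true, List.all_eq_true] at h
      exact h.2 c (by simp)
    have hne : c ≠ '-' := by
      intro hceq; subst hceq; exact absurd hc (by decide)
    exact List.dropWhile_cons_of_neg (by simp [hne])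

-- str(int(...)) is always numeric-like again
theorem pv_numLike_toStr (n : Int) : pvNumLike (PySem.Int.toStr n) = true := by
  unfold pvNumLike PySem.Int.toStr
  rw [String.toList_ofList]
  unfold PySem.Int.toChars
  by_cases h : n < 0
  · simp only [h, if_true]
    rw [List.dropWhile_cons_of_pos (by decide)]
    rw [pv_dropWhile_dash_digits _ (pv_strIsdigit_toDigits _)]
    exact pv_strIsdigit_toDigits _
  · simp only [h, if_false]
    rw [pv_dropWhile_dash_digits _ (pv_strIsdigit_toDigits _)]
    exact pv_strIsdigit_toDigits _

theorem pv_numLike_norm (item : String) : pvNumLike (pvNorm item) = pvNumLike item := by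
  unfold pvNorm
  by_cases h : pvNumLike item = true
  · simp [h, pv_numLike_toStr]
  · simp [h]

-- A's append-loop is a map
theorem pv_foldl_norm (values : List String) : ∀ acc : List String,
    values.foldl
      (fun acc item =>
        if pvNumLike item then acc ++ [PySem.Int.toStr ((PySem.Int.ofStr? item).getD 0)]
        else acc ++ [item]) acc = acc ++ values.map pvNorm := by
  induction values with
  | nil => intro acc; simp
  | cons v t ih =>
    intro acc
    simp only [List.foldl_cons, List.map_cons]
    by_cases h : pvNumLike v = true
    · rw [if_pos h, ih]; simp [pvNorm, h]
    · rw [if_neg h, ih]; simp [pvNorm, h]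

-- B's bucket loop partitions the stripped nonempty tokens
theorem pv_foldl_buckets (chunks : List String) : ∀ (n0 o0 : List String),
    chunks.foldl
      (fun (acc : List String × List String) chunk =>
        if PySem.Str.strip chunk = "" then acc
        else if pvNumLike (PySem.Str.strip chunk) then
          (acc.1 ++ [PySem.Int.toStr ((PySem.Int.ofStr? (PySem.Str.strip chunk)).getD 0)], acc.2)
        else (acc.1, acc.2 ++ [PySem.Str.strip chunk])) (n0, o0) =
      (n0 ++ (((chunks.filterMap
            (fun x => if PySem.Str.strip x = "" then none else some (PySem.Str.strip x))).filter
              pvNumLike).map pvNorm),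
       o0 ++ ((chunks.filterMap
            (fun x => if PySem.Str.strip x = "" then none else some (PySem.Str.strip x))).filter
              (fun x => !pvNumLike x))) := by
  induction chunks with
  | nil => intro n0 o0; simp
  | cons c t ih =>
    intro n0 o0
    by_cases h0 : PySem.Str.strip c = ""
    · rw [List.foldl_cons, if_pos h0, List.filterMap_cons_none (by simp [h0])]
      exact ih n0 o0
    · rw [List.foldl_cons, if_neg h0, List.filterMap_cons_some (f := fun x => if PySem.Str.strip x = "" then none else some (PySem.Str.strip x)) (b := PySem.Str.strip c) (by simp [h0])]
      by_cases h1 : pvNumLike (PySem.Str.strip c) = true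
      · rw [if_pos h1, List.filter_cons_of_pos h1,
          List.filter_cons_of_neg (by simp [h1]), List.map_cons]
        rw [ih]
        simp [pvNorm, h1]
      · rw [if_neg h1, List.filter_cons_of_neg h1,
          List.filter_cons_of_pos (by simp [Bool.not_eq_true] at h1 ⊢; exact h1)]
        rw [ih]
        simp

-- set(...) commutes with a filter
theorem pv_foldl_add_filter (p : String → Bool) (L : List String) : ∀ s : List String,
    ((L.filter p).foldl PySem.Set.add (s.filter p)) = (L.foldl PySem.Set.add s).filter p := by
  induction L with
  | nil => intro s; simp
  | cons x t ih =>
    intro s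
    simp only [List.foldl_cons]
    by_cases hp : p x = true
    · rw [List.filter_cons_of_pos hp]
      simp only [List.foldl_cons]
      have hadd : PySem.Set.add (s.filter p) x = (PySem.Set.add s x).filter p := by
        unfold PySem.Set.add PySem.Set.contains
        by_cases hm : x ∈ s
        · rw [if_pos (by simp [List.mem_filter, hm, hp]), if_pos (by simp [hm])]
        · rw [if_neg (by simp [List.mem_filter, hm]), if_neg (by simp [hm])]
          simp [List.filter_append, hp]
      rw [hadd, ih]
    · rw [List.filter_cons_of_neg (by simp [hp])]
      have hadd : (PySem.Set.add s x).filter p = s.filter p := by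
        unfold PySem.Set.add PySem.Set.contains
        by_cases hm : List.contains s x = true
        · rw [if_pos hm]
        · rw [if_neg hm]
          simp [List.filter_append, hp]
      rw [ih, ← ih (PySem.Set.add s x), hadd, ih]

theorem pv_ofList_filter (p : String → Bool) (L : List String) :
    PySem.Set.ofList (L.filter p) = (PySem.Set.ofList L).filter p := by
  rw [PySem.Set.ofList_eq_foldl, PySem.Set.ofList_eq_foldl]
  have := pv_foldl_add_filter p L []
  simpa using this

-- sorted2 with a two-component key is sorted with the lexicographic key
theorem pv_sorted2_eq_sorted_lex {α κ₁ κ₂ : Type} [LinearOrder κ₁] [LinearOrder κ₂]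
    (xs : List α) (k1 : α → κ₁) (k2 : α → κ₂) :
    PySem.List.sorted2 xs k1 k2 = PySem.List.sorted xs (fun x => toLex (k1 x, k2 x)) := by
  unfold PySem.List.sorted2 PySem.List.sorted
  simp only [if_neg (by decide : ¬(false = true))]
  congr 1
  funext acc c
  congr 1
  funext a b
  have : (toLex (k1 a, k2 a) < toLex (k1 b, k2 b)) ↔
      (k1 a < k1 b ∨ (k1 a = k1 b ∧ k2 a < k2 b)) := Prod.Lex.lt_iff
  by_cases h1 : k1 a < k1 b
  · simp [h1, this]
  · by_cases h2 : k1 b < k1 a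
    · have hne : k1 a ≠ k1 b := ne_of_gt h2
      simp [h1, h2, this, hne]
    · have heq : k1 a = k1 b := le_antisymm (le_of_not_gt h2) (le_of_not_gt h1)
      simp [heq, Prod.Lex.lt_iff]

-- ===== VERDICT (by name: the statement is the Claim_ definition above) =====
theorem parse_clip_ids_py_spec : Claim_equal_parse_clip_ids_py := by
  intro arg _ _
  unfold Spec_parse_clip_ids_py parse_clip_ids_py parse_clip_ids_py_alt
  simp only []
  set chunks := (PySem.Str.split? arg ",").getD [] with hchunks
  set values := chunks.filterMap
    (fun x => if PySem.Str.strip x = "" then none else some (PySem.Str.strip x)) with hvalues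
  rw [pv_foldl_norm values [], pv_foldl_buckets chunks [] []]
  simp only [List.nil_append]
  set L := values.map pvNorm with hL
  have hnums : (values.filter pvNumLike).map pvNorm = L.filter pvNumLike := by
    rw [hL, List.filter_map]
    congr 1
    apply List.filter_congr
    intro x _
    simp [Function.comp, pv_numLike_norm]
  have hothers : values.filter (fun x => !pvNumLike x) = L.filter (fun x => !pvNumLike x) := by
    rw [hL, List.filter_map]
    have : (values.filter ((fun x => !pvNumLike x) ∘ pvNorm)).map pvNorm
        = values.filter (fun x => !pvNumLike x) := by
      have hf : values.filter ((fun x => !pvNumLike x) ∘ pvNorm)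
          = values.filter (fun x => !pvNumLike x) := by
        apply List.filter_congr
        intro x _
        simp [Function.comp, pv_numLike_norm]
      rw [hf]
      conv_rhs => rw [← List.map_id (values.filter (fun x => !pvNumLike x))]
      apply List.map_congr_left
      intro x hx
      have hxn : pvNumLike x = false := by
        have := (List.mem_filter.mp hx).2
        cases h : pvNumLike x <;> simp_all
      simp [pvNorm, hxn]
    rw [this]
  rw [hnums] at *
  rw [hothers]
  rw [pv_sorted2_eq_sorted_lex]
  apply PySem.List.sorted_eq_of_perm_of_pairwise_lt
  · -- permutation
    have p1 := PySem.List.sorted_perm (PySem.Set.ofList (L.filter pvNumLike)) (fun x => x) false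
    have p2 := PySem.List.sorted_perm (PySem.Set.ofList (L.filter (fun x => !pvNumLike x))) (fun x => x) false
    refine ((p1.append p2).trans ?_)
    rw [pv_ofList_filter, pv_ofList_filter]
    exact List.filter_append_perm _ _
  · -- pairwise strict lexicographic increase
    have hmem1 : ∀ x ∈ PySem.List.sorted (PySem.Set.ofList (L.filter pvNumLike)) (fun x => x) false,
        pvNumLike x = true := by
      intro x hx
      have : x ∈ L.filter pvNumLike := by
        have := (PySem.List.mem_sorted _ _ _ _).mp hx
        exact (PySem.Set.mem_ofList _ _).mp this
      exact (List.mem_filter.mp this).2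
    have hmem2 : ∀ x ∈ PySem.List.sorted (PySem.Set.ofList (L.filter (fun x => !pvNumLike x))) (fun x => x) false,
        pvNumLike x = false := by
      intro x hx
      have : x ∈ L.filter (fun x => !pvNumLike x) := by
        have := (PySem.List.mem_sorted _ _ _ _).mp hx
        exact (PySem.Set.mem_ofList _ _).mp this
      have := (List.mem_filter.mp this).2
      cases h : pvNumLike x <;> simp_all
    rw [List.pairwise_append]
    refine ⟨?_, ?_, ?_⟩
    · have hp := PySem.List.sorted_ofList_pairwise_lt (L.filter pvNumLike)
      refine hp.imp_of_mem ?_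
      intro a b ha hb hlt
      rw [Prod.Lex.lt_iff]
      right
      exact ⟨by simp [hmem1 a ha, hmem1 b hb], hlt⟩
    · have hp := PySem.List.sorted_ofList_pairwise_lt (L.filter (fun x => !pvNumLike x))
      refine hp.imp_of_mem ?_
      intro a b ha hb hlt
      rw [Prod.Lex.lt_iff]
      right
      exact ⟨by simp [hmem2 a ha, hmem2 b hb], hlt⟩
    · intro a ha b hb
      rw [Prod.Lex.lt_iff]
      left
      simp [hmem1 a ha, hmem2 b hb]
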